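-- pv_equiv track=rewrite | github.com/CJROYCE4311/website-sg-sg | scripts/ingest_data.py | build_archive_label
-- ===== SOURCE A (Python) =====
-- def build_archive_label(data):
--     """Return a stable archive label for single-date or batch payloads."""
--     if 'update_batch' in data:
--         dates = sorted({entry.get('date') for entry in data['update_batch'] if entry.get('date')})
--         if not dates:
--             return None
--         if len(dates) == 1:
--             return dates[0]
--         return f"{dates[0]}_to_{dates[-1]}"
--     return data.get('date')
-- ===== SOURCE B (Python) =====
-- def build_archive_label(data):
--     """Return a stable archive label for single-date or batch payloads."""
--     if 'update_batch' in data: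
--         lo = hi = None
--         for entry in data['update_batch']:
--             d = entry.get('date')
--             if d:
--                 if lo is None:
--                     lo = hi = d
--                 else:
--                     if d < lo:
--                         lo = d
--                     if d > hi:
--                         hi = d
--         if lo is None:
--             return None
--         return lo if lo == hi else f"{lo}_to_{hi}"
--     return data.get('date')
-- ===== Notes on version B (the rewrite author's own statement) =====
-- stated objective: alternative
-- what changed: Replaces building a set of the truthy dates and sorting it to read off the endpoints with one streaming pass over the batch that maintains a running (lo, hi) accumulator; the single-distinct-date case falls out as lo == hi, so both the set and the sort disappear.
-- outside the precondition, e.g. on build_archive_label({'date': [{'x': 'y'}]}): A returns [{'x': 'y'}], B returns [{'x': 'y'}]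
import Mathlib
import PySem

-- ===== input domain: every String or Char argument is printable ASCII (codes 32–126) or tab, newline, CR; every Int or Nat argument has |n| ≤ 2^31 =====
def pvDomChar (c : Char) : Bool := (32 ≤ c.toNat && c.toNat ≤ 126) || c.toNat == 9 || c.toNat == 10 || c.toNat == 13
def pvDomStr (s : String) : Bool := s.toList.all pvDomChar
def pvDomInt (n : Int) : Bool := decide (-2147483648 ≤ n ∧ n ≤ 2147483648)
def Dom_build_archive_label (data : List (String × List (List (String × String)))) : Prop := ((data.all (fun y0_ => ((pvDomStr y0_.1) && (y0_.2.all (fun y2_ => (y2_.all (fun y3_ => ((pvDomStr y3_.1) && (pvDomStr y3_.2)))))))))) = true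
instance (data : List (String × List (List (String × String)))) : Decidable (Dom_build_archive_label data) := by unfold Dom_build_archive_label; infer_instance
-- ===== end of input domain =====

-- B replaces A's build-a-set/sort/read-endpoints with a single streaming pass that
-- maintains a running (lo, hi) accumulator (alternative one-pass algorithm).

-- ===== PORT A =====
-- truthy entry.get('date'): some d iff 'date' maps to a non-empty string
def pvTruthyDate (entry : List (String × String)) : Option String :=
  match PySem.Dict.get? (PySem.Dict.mk entry) "date" with
  | some d => if d = "" then none else some d
  | none => none

def build_archive_label (data : List (String × List (List (String × String)))) : Option String :=
  match PySem.Dict.get? (PySem.Dict.mk data) "update_batch" with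
  | some batch =>
    -- sorted({entry.get('date') for entry in batch if entry.get('date')})
    let dates := PySem.List.sorted (PySem.Set.ofList (batch.filterMap pvTruthyDate)) (fun x => x) false
    match dates with
    | [] => none
    | d0 :: rest =>
      if rest = [] then some d0
      else
        match (d0 :: rest).getLast? with     -- dates[-1]
        | some dl => some (d0 ++ "_to_" ++ dl)
        | none => none                        -- unreachable: list is nonempty
  | none =>
    -- data.get('date'): under Pre_ the key is absent (when present its value is not a str)
    match PySem.Dict.get? (PySem.Dict.mk data) "date" with
    | some _ => none
    | none => none

-- ===== PORT B =====
-- one loop step: d = entry.get('date'); if d: update the running (lo, hi)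
def pvScan (st : Option (String × String)) (entry : List (String × String)) : Option (String × String) :=
  match PySem.Dict.get? (PySem.Dict.mk entry) "date" with
  | some d =>
    if d = "" then st
    else
      match st with
      | none => some (d, d)
      | some (lo, hi) => some ((if d < lo then d else lo), (if hi < d then d else hi))
  | none => st

def build_archive_label_alt (data : List (String × List (List (String × String)))) : Option String :=
  match PySem.Dict.get? (PySem.Dict.mk data) "update_batch" with
  | some batch =>
    match batch.foldl pvScan none with
    | none => none                                          -- lo is None: no truthy date seen
    | some (lo, hi) => if lo = hi then some lo else some (lo ++ "_to_" ++ hi)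
  | none =>
    -- data.get('date'): under Pre_ the key is absent (when present its value is not a str)
    match PySem.Dict.get? (PySem.Dict.mk data) "date" with
    | some _ => none
    | none => none

-- ===== PRECONDITION & SPEC =====
-- Pre_ excludes payloads with a 'date' key but no 'update_batch' key: there A returns
-- data['date'], which under this task's input type is a list of entry-dicts and not a str,
-- so the value lies outside the declared Option String return type (B returns the same
-- list in Python; neither value is representable here).
def Pre_build_archive_label (data : List (String × List (List (String × String)))) : Prop :=
  PySem.Dict.contains (PySem.Dict.mk data) "update_batch" = true ∨ PySem.Dict.contains (PySem.Dict.mk data) "date" = false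
instance (data : List (String × List (List (String × String)))) : Decidable (Pre_build_archive_label data) := by unfold Pre_build_archive_label; infer_instance

def pvWitness_build_archive_label : (List (String × List (List (String × String)))) :=
  [("update_batch", [[("date", "2024-01-02")], [("date", "2024-01-05")]])]

def Spec_build_archive_label (data : List (String × List (List (String × String)))) (out : Option String) : Prop := out = build_archive_label_alt data
instance (data : List (String × List (List (String × String)))) (out : Option String) : Decidable (Spec_build_archive_label data out) := by unfold Spec_build_archive_label; infer_instance

-- ===== CLAIM (what is proved, stated in full; the proofs are below) =====
def Claim_equal_build_archive_label : Prop := ∀ (data : List (String × List (List (String × String)))), Dom_build_archive_label data → Pre_build_archive_label data → Spec_build_archive_label data (build_archive_label data)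

-- ===== LEMMAS AND PROOFS =====

-- the scan step expressed on the already-filtered truthy date
def pvStep (st : Option (String × String)) (d : String) : Option (String × String) :=
  match st with
  | none => some (d, d)
  | some (lo, hi) => some ((if d < lo then d else lo), (if hi < d then d else hi))

theorem pv_scan_eq_step (batch : List (List (String × String))) :
    ∀ st, batch.foldl pvScan st = (batch.filterMap pvTruthyDate).foldl pvStep st := by
  induction batch with
  | nil => intro st; rfl
  | cons e t ih =>
    intro st
    rw [List.foldl_cons, ih (pvScan st e), List.filterMap_cons]
    have he : pvTruthyDate e = none → pvScan st e = st := by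
      unfold pvScan pvTruthyDate
      rcases PySem.Dict.get? (PySem.Dict.mk e) "date" with _ | d
      · intro _; rfl
      · by_cases hd : d = "" <;> simp [hd]
    have hs : ∀ d, pvTruthyDate e = some d → pvScan st e = pvStep st d := by
      unfold pvScan pvTruthyDate pvStep
      rcases PySem.Dict.get? (PySem.Dict.mk e) "date" with _ | d
      · intro _ h; cases h
      · by_cases hd : d = ""
        · simp [hd]
        · intro d' h
          simp [hd] at h
          subst h
          simp [hd]
    rcases h : pvTruthyDate e with _ | d
    · rw [he h]
    · rw [hs d h]; rfl

-- the fold over the filtered list computes extremal elements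
theorem pv_fold_some (L : List String) :
    ∀ lo hi, ∃ lo' hi', L.foldl pvStep (some (lo, hi)) = some (lo', hi') ∧
      lo' ∈ lo :: L ∧ hi' ∈ hi :: L ∧ lo' ≤ lo ∧ hi ≤ hi' ∧
      (∀ y ∈ L, lo' ≤ y ∧ y ≤ hi') := by
  induction L with
  | nil => intro lo hi; exact ⟨lo, hi, rfl, by simp, by simp, le_rfl, le_rfl, by simp⟩
  | cons d t ih =>
    intro lo hi
    have hstep : pvStep (some (lo, hi)) d
        = some ((if d < lo then d else lo), (if hi < d then d else hi)) := rfl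
    rcases ih (if d < lo then d else lo) (if hi < d then d else hi) with
      ⟨lo', hi', hfold, hloMem, hhiMem, hlole, hhile, hext⟩
    refine ⟨lo', hi', by simpa [hstep] using hfold, ?_, ?_, ?_, ?_, ?_⟩
    · rcases List.mem_cons.mp hloMem with h | h
      · subst h; split_ifs <;> simp
      · simp [h]
    · rcases List.mem_cons.mp hhiMem with h | h
      · subst h; split_ifs <;> simp
      · simp [h]
    · exact le_trans hlole (by split_ifs with h; exact le_of_lt h; exact le_rfl)
    · exact le_trans (by split_ifs with h; exact le_of_lt h; exact le_rfl) hhile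
    · intro y hy
      rcases List.mem_cons.mp hy with rfl | hy'
      · constructor
        · exact le_trans hlole (by split_ifs with h; exact le_rfl; exact le_of_not_gt h)
        · exact le_trans (by split_ifs with h; exact le_rfl; exact le_of_not_gt h) hhile
      · exact hext y hy'

-- in a (·<·)-pairwise list the last element dominates every element
theorem pv_last_isMax (l : List String) (z : String) (hz : l.getLast? = some z)
    (hp : l.Pairwise (fun a b : String => a < b)) : ∀ x ∈ l, x ≤ z := by
  induction l with
  | nil => simp at hz
  | cons a t ih =>
    rcases List.pairwise_cons.mp hp with ⟨ha, ht⟩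
    intro x hx
    cases t with
    | nil =>
      simp at hz hx; simp [hx, hz]
    | cons b t' =>
      rw [List.getLast?_cons_cons] at hz
      rcases List.mem_cons.mp hx with rfl | hx'
      · exact le_of_lt (lt_of_lt_of_le (ha b (by simp))
          ((ih hz ht) b (by simp)))
      · exact (ih hz ht) x hx'

-- core: on any truthy-dates list L, A's sorted-set branch equals B's streaming branch
theorem pv_core (L : List String) :
    (match PySem.List.sorted (PySem.Set.ofList L) (fun x => x) false with
     | [] => (none : Option String)
     | d0 :: rest =>
       if rest = [] then some d0
       else
         match (d0 :: rest).getLast? with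
         | some dl => some (d0 ++ "_to_" ++ dl)
         | none => none)
    = (match L.foldl pvStep none with
       | none => none
       | some (lo, hi) => if lo = hi then some lo else some (lo ++ "_to_" ++ hi)) := by
  rcases hLe : L with _ | ⟨a, t⟩
  · simp [PySem.Set.ofList, PySem.List.sorted]
  · -- fold starting from the first truthy date
    have hstep0 : (a :: t).foldl pvStep none = t.foldl pvStep (some (a, a)) := rfl
    rcases pv_fold_some t a a with ⟨m, M, hfold, hmMemc, hMMemc, hmle, hMge, hext⟩
    have hmMem : m ∈ a :: t := by simpa using hmMemc
    have hMMem : M ∈ a :: t := by simpa using hMMemc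
    have hmMin : ∀ y ∈ a :: t, m ≤ y := by
      intro y hy; rcases List.mem_cons.mp hy with rfl | hy'
      · exact hmle
      · exact (hext y hy').1
    have hMMax : ∀ y ∈ a :: t, y ≤ M := by
      intro y hy; rcases List.mem_cons.mp hy with rfl | hy'
      · exact hMge
      · exact (hext y hy').2
    set D := PySem.List.sorted (PySem.Set.ofList (a :: t)) (fun x => x) false with hD
    have hmemD : ∀ x, x ∈ D ↔ x ∈ a :: t := by
      intro x
      rw [hD, PySem.List.mem_sorted, PySem.Set.mem_ofList]
    have hpw : D.Pairwise (fun a b : String => a < b) := by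
      rw [hD]; exact PySem.List.sorted_ofList_pairwise_lt (a :: t)
    rcases hDe : D with _ | ⟨d0, rest⟩
    · exact absurd ((hmemD m).mpr hmMem) (by simp [hDe])
    have hd0L : d0 ∈ a :: t := (hmemD d0).mp (by simp [hDe])
    have hd0min : ∀ y ∈ a :: t, d0 ≤ y := by
      intro y hy
      have := PySem.List.key_head_sorted_le (xs := PySem.Set.ofList (a :: t))
        (key := fun x => x) (m := d0) (t := rest) (by rw [← hD]; exact hDe)
      exact this y (by rw [PySem.Set.mem_ofList]; exact hy)
    have hd0 : d0 = m := le_antisymm (hd0min m hmMem) (hmMin d0 hd0L)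
    subst hd0
    have hpw2 : (d0 :: rest).Pairwise (fun a b : String => a < b) := hDe ▸ hpw
    by_cases hrest : rest = []
    · subst hrest
      have hMd : M = d0 := by
        have := (hmemD M).mpr hMMem
        simpa [hDe] using this
      subst hMd
      simp [hstep0, hfold]
    · rcases hlast : (d0 :: rest).getLast? with _ | dl
      · simp [List.getLast?_eq_none_iff] at hlast
      have hdlL : dl ∈ a :: t := (hmemD dl).mp (by
        rw [hDe]; exact List.mem_of_getLast? hlast)
      have hdlmax : ∀ x ∈ a :: t, x ≤ dl := by
        intro x hx
        exact pv_last_isMax (d0 :: rest) dl hlast hpw2 x (hDe ▸ (hmemD x).mpr hx)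
      have hdl : dl = M := le_antisymm (hMMax dl hdlL) (hdlmax M hMMem)
      have hne : d0 ≠ M := by
        rcases List.exists_cons_of_ne_nil hrest with ⟨r, t2, rfl⟩
        intro hEq
        have hrL : r ∈ a :: t := (hmemD r).mp (by simp [hDe])
        have h1 : d0 < r := (List.pairwise_cons.mp hpw2).1 r (by simp)
        have h2 : r ≤ M := hMMax r hrL
        rw [← hEq] at h2
        exact absurd (lt_of_lt_of_le h1 h2) (lt_irrefl d0)
      simp [hstep0, hfold, hrest, hlast, hdl, hne]

-- ===== VERDICT (by name: the statement is the Claim_ definition above) =====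
theorem build_archive_label_spec : Claim_equal_build_archive_label := by
  intro data _ _
  unfold Spec_build_archive_label build_archive_label build_archive_label_alt
  rcases PySem.Dict.get? (PySem.Dict.mk data) "update_batch" with _ | batch
  · rfl
  · simpa [pv_scan_eq_step] using pv_core (List.filterMap pvTruthyDate batch)
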